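-- pv_equiv track=rewrite | github.com/PaddlePaddle/Paddle | python/paddle/distributed/auto_parallel/rules.py | compute_compatible_dim_mapping
-- ===== SOURCE A (Python) =====
-- def compute_compatible_dim_mapping(dim_mapping_list):
--     """Compute the compatible dim mapping given a list of dim mapping."""
--     if not dim_mapping_list:
--         return None
--
--     def _compute_compatible_dim_mapping_two(dm1, dm2):
--         if dm1 == -1:
--             return True, dm2
--         if dm2 == -1:
--             return True, dm1
--         if dm1 == dm2:
--             return True, dm1
--         return False, None
--
--     compatible_result = -1
--     for mapping in dim_mapping_list:
--         compatible, compatible_result = _compute_compatible_dim_mapping_two(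
--             compatible_result, mapping)
--         if not compatible:
--             return None
--     return compatible_result
-- ===== SOURCE B (Python) =====
-- def compute_compatible_dim_mapping(dim_mapping_list):
--     """Compute the compatible dim mapping given a list of dim mapping."""
--     if not dim_mapping_list:
--         return None
--     vals = {m for m in dim_mapping_list if m != -1}
--     if len(vals) > 1:
--         return None
--     return vals.pop() if vals else -1
-- ===== Notes on version B (the rewrite author's own statement) =====
-- stated objective: simpler
-- what changed: Replaces the pairwise-merge accumulator loop with a set of the distinct non-wildcard values and a cardinality check (>1 distinct values = conflict).
import Mathlib
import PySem

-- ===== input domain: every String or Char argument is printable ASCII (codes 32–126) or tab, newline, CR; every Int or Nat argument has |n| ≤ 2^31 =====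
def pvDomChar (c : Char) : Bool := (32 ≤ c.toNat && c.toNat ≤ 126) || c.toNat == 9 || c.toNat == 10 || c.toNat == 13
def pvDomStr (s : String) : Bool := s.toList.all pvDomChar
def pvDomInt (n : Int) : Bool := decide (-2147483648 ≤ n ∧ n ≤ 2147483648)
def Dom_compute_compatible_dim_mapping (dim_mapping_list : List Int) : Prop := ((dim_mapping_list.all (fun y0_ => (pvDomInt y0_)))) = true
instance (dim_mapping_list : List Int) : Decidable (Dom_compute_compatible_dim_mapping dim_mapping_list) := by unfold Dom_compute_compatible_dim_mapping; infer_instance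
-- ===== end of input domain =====

-- B replaces A's pairwise-merge accumulator loop by collecting the distinct
-- non-wildcard values into a set and branching on its cardinality (simpler).


-- ===== PORT A =====
-- the helper _compute_compatible_dim_mapping_two is inlined into the loop:
-- its (False, None) branch is exactly the early 'return None'
def pvLoopA (acc : Int) : List Int → Option Int
  | [] => some acc
  | m :: rest =>
    if acc = -1 then pvLoopA m rest
    else if m = -1 then pvLoopA acc rest
    else if acc = m then pvLoopA acc rest
    else none

def compute_compatible_dim_mapping (dim_mapping_list : List Int) : Option Int :=
  match dim_mapping_list with
  | [] => none
  | _ :: _ => pvLoopA (-1) dim_mapping_list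

-- ===== PORT B =====
def compute_compatible_dim_mapping_alt (dim_mapping_list : List Int) : Option Int :=
  match dim_mapping_list with
  | [] => none
  | _ :: _ =>
    let vals : PySem.Set Int := PySem.Set.ofList (dim_mapping_list.filter (fun m => m != -1))
    if 1 < PySem.Set.len vals then none
    else match vals with
      | [] => some (-1)
      | v :: _ => some v

-- ===== PRECONDITION & SPEC =====
def Spec_compute_compatible_dim_mapping (dim_mapping_list : List Int) (out : Option Int) : Prop := out = compute_compatible_dim_mapping_alt dim_mapping_list
instance (dim_mapping_list : List Int) (out : Option Int) : Decidable (Spec_compute_compatible_dim_mapping dim_mapping_list out) := by unfold Spec_compute_compatible_dim_mapping; infer_instance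

-- ===== CLAIM (what is proved, stated in full; the proofs are below) =====
def Claim_equal_compute_compatible_dim_mapping : Prop := ∀ (dim_mapping_list : List Int), Dom_compute_compatible_dim_mapping dim_mapping_list → Spec_compute_compatible_dim_mapping dim_mapping_list (compute_compatible_dim_mapping dim_mapping_list)

-- ===== LEMMAS AND PROOFS =====

-- A's loop after the accumulator has become a concrete value v ≠ -1:
-- it succeeds iff every non-wildcard element equals v.
theorem pvLoopA_ne (l : List Int) : ∀ v : Int, v ≠ -1 →
    pvLoopA v l = if (l.filter (fun m => m != -1)).all (fun m => m == v) then some v else none := by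
  induction l with
  | nil => intro v hv; simp [pvLoopA]
  | cons m rest ih =>
    intro v hv
    by_cases hm : m = -1
    · subst hm; simp [pvLoopA, hv, ih v hv]
    · by_cases hvm : v = m
      · subst hvm; simp [pvLoopA, hv, ih v hv]
      · simp [pvLoopA, hv, hm, hvm, List.all_cons, Ne.symm hvm]

-- A's loop from the initial wildcard accumulator, characterized by the
-- list of non-wildcard elements.
theorem pvLoopA_start (l : List Int) :
    pvLoopA (-1) l = match l.filter (fun m => m != -1) with
      | [] => some (-1)
      | v :: rest => if rest.all (fun m => m == v) then some v else none := by
  induction l with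
  | nil => simp [pvLoopA]
  | cons m rest ih =>
    by_cases hm : m = -1
    · simpa [pvLoopA, hm] using ih
    · simp [pvLoopA, hm, pvLoopA_ne rest m hm]

theorem set_ofList_all_eq (v : Int) (xs : List Int) (h : xs.all (fun m => m == v)) :
    PySem.Set.ofList (v :: xs) = [v] := by
  rw [PySem.Set.ofList_cons]
  have : PySem.Set.discard (PySem.Set.ofList xs) v = [] := by
    rw [List.eq_nil_iff_forall_not_mem]
    intro x hx
    rw [PySem.Set.mem_discard] at hx
    have := List.all_eq_true.mp h x ((PySem.Set.mem_ofList _ _).mp hx.1)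
    exact hx.2 (by simpa using this)
  rw [this]

theorem set_ofList_not_all (v : Int) (xs : List Int) (h : ¬ xs.all (fun m => m == v)) :
    1 < (PySem.Set.ofList (v :: xs)).length := by
  obtain ⟨u, hu, huv⟩ : ∃ u ∈ xs, ¬ (u == v) = true := by
    simpa [List.all_eq_true] using h
  rw [PySem.Set.ofList_cons]
  have : u ∈ PySem.Set.discard (PySem.Set.ofList xs) v :=
    (PySem.Set.mem_discard _ _ _).mpr ⟨(PySem.Set.mem_ofList _ _).mpr hu, by simpa using huv⟩
  have hne : PySem.Set.discard (PySem.Set.ofList xs) v ≠ [] := by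
    intro hc; rw [hc] at this; exact (List.not_mem_nil) this
  have := List.length_pos_iff.mpr hne
  simp only [List.length_cons]
  omega

-- ===== VERDICT (by name: the statement is the Claim_ definition above) =====
theorem compute_compatible_dim_mapping_spec : Claim_equal_compute_compatible_dim_mapping := by
  intro l _
  unfold Spec_compute_compatible_dim_mapping
  cases l with
  | nil => rfl
  | cons a t =>
    show pvLoopA (-1) (a :: t) = _
    rw [pvLoopA_start]
    simp only [compute_compatible_dim_mapping_alt, PySem.Set.len]
    cases hF : (a :: t).filter (fun m => m != -1) with
    | nil => simp
    | cons v rest =>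
      by_cases hall : rest.all (fun m => m == v)
      · rw [set_ofList_all_eq v rest hall]; simp [hall]
      · have h2 := set_ofList_not_all v rest hall
        have h2' : (1 : Int) < (List.length (PySem.Set.ofList (v :: rest)) : Int) := by
          exact_mod_cast h2
        simp [hall, h2']
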